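-- pv_equiv track=rewrite | github.com/N3XDROP/Hackathon | chat/services/ocr_ai.py | mrz_desde_texto_ocr
-- ===== SOURCE A (Python) =====
-- def mrz_desde_texto_ocr(ocr_text: str) -> str:
--     """
--     Reconstruye MRZ a partir del texto OCR plano (EasyOCR).
--     Busca líneas con muchos '<' y arma 1–2 renglones consecutivos.
--     """
--     if not ocr_text:
--         return ""
--     t = ocr_text.replace('\u003c', '<').upper()
--     lines = [ln.strip() for ln in t.splitlines() if ln.strip()]
--
--     cand = [ln for ln in lines if ln.count('<') >= 4]
--     if not cand:
--         return ""
--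
--     def score(ln: str):
--         s = ln.count('<')
--         if 'COL' in ln or 'C0L' in ln:
--             s += 5
--         return s
--
--     cand.sort(key=score, reverse=True)
--     best = cand[0]
--     idx = lines.index(best)
--     mrz_lines = [best]
--
--     # Intenta juntar línea adyacente con '<'
--     if idx + 1 < len(lines) and lines[idx + 1].count('<') >= 4:
--         mrz_lines.append(lines[idx + 1])
--     elif idx - 1 >= 0 and lines[idx - 1].count('<') >= 4:
--         mrz_lines.insert(0, lines[idx - 1])
--
--     return "\n".join(mrz_lines)
-- ===== SOURCE B (Python) =====
-- def mrz_desde_texto_ocr(ocr_text: str) -> str: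
--     """One-pass argmax over the lines (no sort, no lines.index), and the
--     adjacent-line step rebuilt with string concatenation instead of list
--     surgery + join. The '\\u003c' -> '<' replace of the original is a no-op
--     ('\\u003c' IS '<') and is dropped, as is the redundant empty-text guard."""
--     lines = []
--     for raw in ocr_text.upper().splitlines():
--         ln = raw.strip()
--         if ln:
--             lines.append(ln)
--
--     best_i, best_s = -1, -1
--     i = 0
--     while i < len(lines):
--         c = lines[i].count('<')
--         if c >= 4:
--             s = c + 5 * (('COL' in lines[i]) or ('C0L' in lines[i]))
--             if s > best_s:
--                 best_i, best_s = i, s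
--         i += 1
--
--     if best_i < 0:
--         return ""
--     idx = best_i
--     nxt = lines[idx + 1] if idx + 1 < len(lines) else ""
--     prv = lines[idx - 1] if idx > 0 else ""
--     if nxt.count('<') >= 4:
--         return lines[idx] + "\n" + nxt
--     if prv.count('<') >= 4:
--         return prv + "\n" + lines[idx]
--     return lines[idx]
-- ===== Notes on version B (the rewrite author's own statement) =====
-- stated objective: simpler
-- what changed: Replaces the sort of all candidates plus the lines.index lookup with one argmax pass keeping (best_index, best_score) with a strictly-greater update (preserving the stable-sort first-max tie-break), drops the no-op replace('\u003c','<') and the redundant empty-text guard, and builds the result by string concatenation on precomputed neighbours instead of list insert/append + join.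
import Mathlib
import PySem

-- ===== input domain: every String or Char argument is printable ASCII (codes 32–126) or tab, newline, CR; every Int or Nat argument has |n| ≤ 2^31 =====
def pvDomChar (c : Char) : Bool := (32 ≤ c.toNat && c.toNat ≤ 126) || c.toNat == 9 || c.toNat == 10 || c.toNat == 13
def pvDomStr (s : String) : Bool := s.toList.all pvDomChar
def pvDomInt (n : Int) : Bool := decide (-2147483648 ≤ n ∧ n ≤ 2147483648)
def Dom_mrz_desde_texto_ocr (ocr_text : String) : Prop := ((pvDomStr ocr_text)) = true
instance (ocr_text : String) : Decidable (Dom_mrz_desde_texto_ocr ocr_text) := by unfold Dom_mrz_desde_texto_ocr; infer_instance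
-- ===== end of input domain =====

-- B replaces A's sort-all-candidates + lines.index lookup with one recursive argmax
-- scan and rebuilds the result by string concatenation instead of list surgery + join
-- (objective: simpler; A's replace('\u003c','<') is a no-op and is dropped in B).


-- ===== PORT A =====
-- Python A's inner `def score(ln)` (count('<') plus 5 on a COL/C0L hit)
def pvScoreA (ln : String) : Int :=
  let s : Int := (PySem.Str.count ln "<" : Int)
  if PySem.Str.isIn "COL" ln || PySem.Str.isIn "C0L" ln then s + 5 else s

def mrz_desde_texto_ocr (ocr_text : String) : String :=
  if ocr_text = "" then ""
  else
    let t := PySem.Str.upper (PySem.Str.replace ocr_text "<" "<")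
    let lines := ((PySem.Str.splitlines t).filter
        (fun ln => decide (PySem.Str.strip ln ≠ ""))).map PySem.Str.strip
    let cand := lines.filter (fun ln => decide (4 ≤ PySem.Str.count ln "<"))
    if cand = [] then ""
    else
      let best := (PySem.List.sorted cand pvScoreA true).headD ""
      let idx : Int := ((PySem.List.index? lines best).getD 0 : Nat)
      let mrz_lines := [best]
      let mrz_lines :=
        if idx + 1 < (lines.length : Int) ∧
            4 ≤ PySem.Str.count (PySem.List.pyGetD lines (idx + 1) "") "<" then
          mrz_lines ++ [PySem.List.pyGetD lines (idx + 1) ""]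
        else if 0 ≤ idx - 1 ∧
            4 ≤ PySem.Str.count (PySem.List.pyGetD lines (idx - 1) "") "<" then
          PySem.List.pyGetD lines (idx - 1) "" :: mrz_lines
        else mrz_lines
      PySem.Str.join "\n" mrz_lines

-- ===== PORT B =====
-- Source B's while-loop argmax scan: walks the remaining lines carrying the
-- running index i (lines[i] is the head of the remaining suffix)
def pvPickB : List String → Int → Int → Int → Int × Int
  | [], _, best_i, best_s => (best_i, best_s)
  | ln :: rest, i, best_i, best_s =>
    let c := PySem.Str.count ln "<"
    if 4 ≤ c then
      let s : Int := (c : Int) + 5 * (if PySem.Str.isIn "COL" ln || PySem.Str.isIn "C0L" ln then 1 else 0)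
      if best_s < s then pvPickB rest (i + 1) i s else pvPickB rest (i + 1) best_i best_s
    else pvPickB rest (i + 1) best_i best_s

def mrz_desde_texto_ocr_alt (ocr_text : String) : String :=
  let lines := (PySem.Str.splitlines (PySem.Str.upper ocr_text)).filterMap
      (fun raw => let ln := PySem.Str.strip raw; if ln = "" then none else some ln)
  let idx := (pvPickB lines 0 (-1) (-1)).1
  if idx < 0 then ""
  else
    let nxt := if idx + 1 < (lines.length : Int) then PySem.List.pyGetD lines (idx + 1) "" else ""
    let prv := if 0 < idx then PySem.List.pyGetD lines (idx - 1) "" else ""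
    if 4 ≤ PySem.Str.count nxt "<" then
      PySem.List.pyGetD lines idx "" ++ "\n" ++ nxt
    else if 4 ≤ PySem.Str.count prv "<" then
      prv ++ "\n" ++ PySem.List.pyGetD lines idx ""
    else PySem.List.pyGetD lines idx ""

-- ===== PRECONDITION & SPEC =====
def Spec_mrz_desde_texto_ocr (ocr_text : String) (out : String) : Prop := out = mrz_desde_texto_ocr_alt ocr_text
instance (ocr_text : String) (out : String) : Decidable (Spec_mrz_desde_texto_ocr ocr_text out) := by unfold Spec_mrz_desde_texto_ocr; infer_instance

-- ===== CLAIM (what is proved, stated in full; the proofs are below) =====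
def Claim_equal_mrz_desde_texto_ocr : Prop := ∀ (ocr_text : String), Dom_mrz_desde_texto_ocr ocr_text → Spec_mrz_desde_texto_ocr ocr_text (mrz_desde_texto_ocr ocr_text)

-- ===== LEMMAS AND PROOFS =====

-- A's replace('\u003c', '<') is the identity: '\u003c' IS '<'
lemma pvReplaceGo_self (n : Nat) (cs acc : List Char) (h : cs.length ≤ n) :
    PySem.Chars.replace.go "<".toList "<".toList n cs acc = acc.reverse ++ cs := by
  induction n generalizing cs acc with
  | zero => unfold PySem.Chars.replace.go; rfl
  | succ n ih =>
    unfold PySem.Chars.replace.go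
    cases cs with
    | nil => simp
    | cons c t =>
      simp only []
      by_cases hp : "<".toList.isPrefixOf (c :: t) = true
      · have hc : c = '<' := by
          simp [List.isPrefixOf] at hp; exact hp.symm
        rw [if_pos hp, ih _ _ (by simpa using Nat.le_of_succ_le_succ h)]
        simp [hc]
      · rw [if_neg hp, ih _ _ (by simpa using Nat.le_of_succ_le_succ h)]
        simp

lemma pvReplace_self (s : String) : PySem.Str.replace s "<" "<" = s := by
  have h : (PySem.Str.replace s "<" "<").toList = s.toList := by
    rw [PySem.Str.toList_replace]
    unfold PySem.Chars.replace
    rw [if_neg (by decide), pvReplaceGo_self _ _ _ le_rfl]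
    rfl
  exact String.toList_injective h

-- B's strip-and-keep filterMap builds the same line list as A's filter-then-map
lemma pvLines_eq (l : List String) :
    l.filterMap (fun raw => let ln := PySem.Str.strip raw; if ln = "" then none else some ln)
      = (l.filter (fun ln => decide (PySem.Str.strip ln ≠ ""))).map PySem.Str.strip := by
  induction l with
  | nil => rfl
  | cons x xs ih =>
    by_cases h : PySem.Str.strip x = "" <;>
      simp [h, ih]

-- proof-side restatement of one pick step as a fold step over enumerate
def pvScoreStepB (st : Int × Int) (p : Int × String) : Int × Int :=
  let c := PySem.Str.count p.2 "<"
  if c < 4 then st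
  else
    let s : Int := (c : Int) + (if PySem.Str.isIn "COL" p.2 || PySem.Str.isIn "C0L" p.2 then 5 else 0)
    if st.1 < s then (s, p.1) else st

lemma pvPickB_eq_foldl (rest : List String) (i bi bs : Int) :
    pvPickB rest i bi bs = ((PySem.List.enumerate rest i).foldl pvScoreStepB (bs, bi)).swap := by
  induction rest generalizing i bi bs with
  | nil => rfl
  | cons ln r ih =>
    have he : PySem.List.enumerate (ln :: r) i = (i, ln) :: PySem.List.enumerate r (i + 1) := by
      simp [PySem.List.enumerate]
    rw [he, List.foldl_cons]
    unfold pvPickB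
    simp only []
    have hs : (PySem.Str.count ln "<" : Int) +
          5 * (if PySem.Str.isIn "COL" ln || PySem.Str.isIn "C0L" ln then 1 else 0)
        = (PySem.Str.count ln "<" : Int) +
          (if PySem.Str.isIn "COL" ln || PySem.Str.isIn "C0L" ln then 5 else 0) := by
      by_cases hc : PySem.Str.isIn "COL" ln || PySem.Str.isIn "C0L" ln <;> simp
    by_cases h4 : 4 ≤ PySem.Str.count ln "<"
    · have hstep : pvScoreStepB (bs, bi) (i, ln) =
          if bs < (PySem.Str.count ln "<" : Int) +
              (if PySem.Str.isIn "COL" ln || PySem.Str.isIn "C0L" ln then 5 else 0) then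
            ((PySem.Str.count ln "<" : Int) +
              (if PySem.Str.isIn "COL" ln || PySem.Str.isIn "C0L" ln then 5 else 0), i)
          else (bs, bi) := by
        simp only [pvScoreStepB]
        rw [if_neg (by omega : ¬ PySem.Str.count ln "<" < 4)]
      rw [if_pos h4, hstep, hs]
      by_cases hlt : bs < (PySem.Str.count ln "<" : Int) +
          (if PySem.Str.isIn "COL" ln || PySem.Str.isIn "C0L" ln then 5 else 0)
      · rw [if_pos hlt, if_pos hlt, ih]
      · rw [if_neg hlt, if_neg hlt, ih]
    · have hstep : pvScoreStepB (bs, bi) (i, ln) = (bs, bi) := by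
        simp only [pvScoreStepB]
        rw [if_pos (by omega : PySem.Str.count ln "<" < 4)]
      rw [if_neg h4, hstep, ih]

-- first-maximum of the candidate list, as a left fold (proof-side only)
def pvPick (cand : List String) : Option String :=
  cand.foldl (fun o x => match o with
    | none => some x
    | some m => if pvScoreA m < pvScoreA x then some x else some m) none

lemma pvHead?_insertBy (b : String → String → Bool) (x : String) (acc : List String) :
    (PySem.List.insertBy b x acc).head? =
      some (match acc.head? with | none => x | some m => if b x m then x else m) := by
  cases acc with
  | nil => simp [PySem.List.insertBy]
  | cons m t =>
    simp only [PySem.List.insertBy, List.head?_cons]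
    split <;> simp

lemma pvHead?_sorted_rev (cand : List String) :
    (PySem.List.sorted cand pvScoreA true).head? = pvPick cand := by
  rw [PySem.List.sorted_rev_eq_foldl_insertBy]
  unfold pvPick
  induction cand using List.reverseRecOn with
  | nil => rfl
  | append_singleton xs x ih =>
    rw [List.foldl_append, List.foldl_append]
    simp only [List.foldl_cons, List.foldl_nil]
    rw [pvHead?_insertBy, ih]
    cases h : xs.foldl (fun o x => match o with
      | none => some x
      | some m => if pvScoreA m < pvScoreA x then some x else some m) none with
    | none => simp
    | some m => by_cases hlt : pvScoreA m < pvScoreA x <;> simp [hlt]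

def pvCand (ln : String) : Bool := decide (4 ≤ PySem.Str.count ln "<")

lemma pvScoreA_eq (x : String) :
    pvScoreA x = (PySem.Str.count x "<" : Int) +
      (if PySem.Str.isIn "COL" x || PySem.Str.isIn "C0L" x then 5 else 0) := by
  simp only [pvScoreA]
  split <;> simp

lemma pvScore_of_cand {x : String} (hx : pvCand x = true) : 4 ≤ pvScoreA x := by
  unfold pvCand at hx
  have hc : (4 : Int) ≤ (PySem.Str.count x "<" : Int) := by exact_mod_cast of_decide_eq_true hx
  simp only [pvScoreA]
  split <;> omega

lemma pvStepB_eq (st : Int × Int) (i : Int) (x : String) (hx : pvCand x = true) :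
    pvScoreStepB st (i, x) = if st.1 < pvScoreA x then (pvScoreA x, i) else st := by
  unfold pvCand at hx
  have h4 : 4 ≤ PySem.Str.count x "<" := of_decide_eq_true hx
  simp only [pvScoreStepB]
  rw [if_neg (by omega : ¬ PySem.Str.count x "<" < 4), ← pvScoreA_eq]

lemma pvStepB_skip (st : Int × Int) (i : Int) (x : String) (hx : pvCand x = false) :
    pvScoreStepB st (i, x) = st := by
  unfold pvCand at hx
  have h4 : PySem.Str.count x "<" < 4 := by
    have := of_decide_eq_false hx; omega
  simp only [pvScoreStepB]
  rw [if_pos h4]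

-- the scan invariant tying B's recursion (via its fold form) to A's first-maximum
-- and its first index in `lines`
lemma pvScan_spec (lines : List String) :
    (lines.filter pvCand = [] ∧
      (PySem.List.enumerate lines 0).foldl pvScoreStepB (-1, -1) = (-1, -1))
    ∨ (∃ m k, pvPick (lines.filter pvCand) = some m ∧ m ∈ lines.filter pvCand ∧
        PySem.List.index? lines m = some k ∧
        (PySem.List.enumerate lines 0).foldl pvScoreStepB (-1, -1) = (pvScoreA m, (k : Int)) ∧
        ∀ y ∈ lines.filter pvCand, pvScoreA y ≤ pvScoreA m) := by
  induction lines using List.reverseRecOn with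
  | nil => left; constructor <;> rfl
  | append_singleton xs x ih =>
    rw [PySem.List.enumerate_append, List.foldl_append, List.filter_append]
    simp only [PySem.List.enumerate, List.foldl_cons, List.foldl_nil] at *
    cases hcx : pvCand x with
    | false =>
      simp only [List.filter_cons, hcx, Bool.false_eq_true, if_false, List.filter_nil,
        List.append_nil]
      rcases ih with ⟨hf, hr⟩ | ⟨m, k, hpick, hmem, hidx, hr, hmax⟩
      · left
        refine ⟨hf, ?_⟩
        rw [hr]
        exact pvStepB_skip _ _ _ hcx
      · right
        refine ⟨m, k, hpick, hmem, ?_, ?_, hmax⟩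
        · rw [PySem.List.index?_append_of_mem _ (List.mem_of_mem_filter hmem)]; exact hidx
        · rw [hr, pvStepB_skip _ _ _ hcx]
    | true =>
      simp only [List.filter_cons, hcx, if_true, List.filter_nil]
      rcases ih with ⟨hf, hr⟩ | ⟨m, k, hpick, hmem, hidx, hr, hmax⟩
      · right
        have hxnot : x ∉ xs := by
          intro hx
          have : x ∈ xs.filter pvCand := List.mem_filter.mpr ⟨hx, hcx⟩
          rw [hf] at this; exact absurd this (List.not_mem_nil)
        refine ⟨x, xs.length, ?_, ?_, ?_, ?_, ?_⟩
        · unfold pvPick; rw [hf]; rfl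
        · rw [hf]; simp
        · exact PySem.List.index?_append_singleton_self xs x hxnot
        · rw [hr, pvStepB_eq _ _ _ hcx]
          have : (-1 : Int) < pvScoreA x := by have := pvScore_of_cand hcx; omega
          simp [this]
        · rw [hf]; intro y hy; simp at hy; subst hy; exact le_refl _
      · by_cases hlt : pvScoreA m < pvScoreA x
        · right
          have hxnot : x ∉ xs := by
            intro hx
            have hxc : x ∈ xs.filter pvCand := List.mem_filter.mpr ⟨hx, hcx⟩
            have := hmax x hxc; omega
          refine ⟨x, xs.length, ?_, ?_, ?_, ?_, ?_⟩
          · unfold pvPick at hpick ⊢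
            rw [List.foldl_append, hpick]
            simp [hlt]
          · simp
          · exact PySem.List.index?_append_singleton_self xs x hxnot
          · rw [hr, pvStepB_eq _ _ _ hcx]
            simp [hlt]
          · intro y hy
            rcases List.mem_append.mp hy with hy | hy
            · have := hmax y hy; omega
            · simp at hy; subst hy; exact le_refl _
        · right
          refine ⟨m, k, ?_, List.mem_append_left _ hmem, ?_, ?_, ?_⟩
          · unfold pvPick at hpick ⊢
            rw [List.foldl_append, hpick]
            simp [hlt]
          · rw [PySem.List.index?_append_of_mem _ (List.mem_of_mem_filter hmem)]; exact hidx
          · rw [hr, pvStepB_eq _ _ _ hcx]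
            simp [hlt]
          · intro y hy
            rcases List.mem_append.mp hy with hy | hy
            · exact hmax y hy
            · simp at hy; subst hy; omega

lemma pvJoin_one (a : String) : PySem.Str.join "\n" [a] = a := by
  apply String.toList_injective
  rw [PySem.Str.toList_join]
  simp [PySem.Chars.join_singleton]

lemma pvJoin_two (a b : String) : PySem.Str.join "\n" [a, b] = a ++ "\n" ++ b := by
  apply String.toList_injective
  rw [PySem.Str.toList_join]
  simp [PySem.Chars.join_cons_cons, PySem.Chars.join_singleton]

-- A's list-surgery tail equals B's concatenation tail at the winning index k
lemma pvTail_eq (lines : List String) (k : Nat) :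
    (let idx : Int := (k : Nat)
     let m := PySem.List.pyGetD lines idx ""
     PySem.Str.join "\n"
       (if idx + 1 < (lines.length : Int) ∧
            4 ≤ PySem.Str.count (PySem.List.pyGetD lines (idx + 1) "") "<" then
          [m] ++ [PySem.List.pyGetD lines (idx + 1) ""]
        else if 0 ≤ idx - 1 ∧
            4 ≤ PySem.Str.count (PySem.List.pyGetD lines (idx - 1) "") "<" then
          PySem.List.pyGetD lines (idx - 1) "" :: [m]
        else [m]))
    =
    (let idx : Int := (k : Nat)
     let nxt := if idx + 1 < (lines.length : Int) then PySem.List.pyGetD lines (idx + 1) "" else ""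
     let prv := if 0 < idx then PySem.List.pyGetD lines (idx - 1) "" else ""
     if 4 ≤ PySem.Str.count nxt "<" then
       PySem.List.pyGetD lines idx "" ++ "\n" ++ nxt
     else if 4 ≤ PySem.Str.count prv "<" then
       prv ++ "\n" ++ PySem.List.pyGetD lines idx ""
     else PySem.List.pyGetD lines idx "") := by
  simp only [List.singleton_append]
  have hcount0 : PySem.Str.count "" "<" = 0 := by decide
  by_cases hn : ((k : Int) + 1 < (lines.length : Int))
  · rw [if_pos hn]
    by_cases hnc : 4 ≤ PySem.Str.count (PySem.List.pyGetD lines ((k : Int) + 1) "") "<"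
    · rw [if_pos ⟨hn, hnc⟩, if_pos hnc, pvJoin_two]
    · rw [if_neg (by intro h; exact hnc h.2), if_neg hnc]
      by_cases hp : (0 : Int) < (k : Int)
      · rw [if_pos hp]
        have h0 : (0 : Int) ≤ (k : Int) - 1 := by omega
        by_cases hpc : 4 ≤ PySem.Str.count (PySem.List.pyGetD lines ((k : Int) - 1) "") "<"
        · rw [if_pos ⟨h0, hpc⟩, if_pos hpc, pvJoin_two]
        · rw [if_neg (by intro h; exact hpc h.2), if_neg hpc, pvJoin_one]
      · rw [if_neg hp]
        have hk0 : (k : Int) = 0 := by omega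
        rw [if_neg (by rw [hk0]; intro h; omega), hcount0,
          if_neg (by omega : ¬ (4 ≤ 0)), pvJoin_one]
  · rw [if_neg hn, hcount0, if_neg (by omega : ¬ (4 ≤ 0)),
      if_neg (by intro h; exact hn h.1)]
    by_cases hp : (0 : Int) < (k : Int)
    · rw [if_pos hp]
      have h0 : (0 : Int) ≤ (k : Int) - 1 := by omega
      by_cases hpc : 4 ≤ PySem.Str.count (PySem.List.pyGetD lines ((k : Int) - 1) "") "<"
      · rw [if_pos ⟨h0, hpc⟩, if_pos hpc, pvJoin_two]
      · rw [if_neg (by intro h; exact hpc h.2), if_neg hpc, pvJoin_one]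
    · rw [if_neg hp]
      have hk0 : (k : Int) = 0 := by omega
      rw [if_neg (by rw [hk0]; intro h; omega), hcount0,
        if_neg (by omega : ¬ (4 ≤ 0)), pvJoin_one]

-- the whole body after the shared line list has been built
lemma pvMain (lines : List String) :
    (if lines.filter (fun ln => decide (4 ≤ PySem.Str.count ln "<")) = [] then ""
     else
      let best := (PySem.List.sorted (lines.filter (fun ln => decide (4 ≤ PySem.Str.count ln "<"))) pvScoreA true).headD ""
      let idx : Int := ((PySem.List.index? lines best).getD 0 : Nat)
      let mrz_lines := [best]
      let mrz_lines :=
        if idx + 1 < (lines.length : Int) ∧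
            4 ≤ PySem.Str.count (PySem.List.pyGetD lines (idx + 1) "") "<" then
          mrz_lines ++ [PySem.List.pyGetD lines (idx + 1) ""]
        else if 0 ≤ idx - 1 ∧
            4 ≤ PySem.Str.count (PySem.List.pyGetD lines (idx - 1) "") "<" then
          PySem.List.pyGetD lines (idx - 1) "" :: mrz_lines
        else mrz_lines
      PySem.Str.join "\n" mrz_lines)
    =
    (let idx := (pvPickB lines 0 (-1) (-1)).1
     if idx < 0 then ""
     else
      let nxt := if idx + 1 < (lines.length : Int) then PySem.List.pyGetD lines (idx + 1) "" else ""
      let prv := if 0 < idx then PySem.List.pyGetD lines (idx - 1) "" else ""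
      if 4 ≤ PySem.Str.count nxt "<" then
        PySem.List.pyGetD lines idx "" ++ "\n" ++ nxt
      else if 4 ≤ PySem.Str.count prv "<" then
        prv ++ "\n" ++ PySem.List.pyGetD lines idx ""
      else PySem.List.pyGetD lines idx "") := by
  have hc : (fun ln => decide (4 ≤ PySem.Str.count ln "<")) = pvCand := rfl
  rw [hc, pvPickB_eq_foldl]
  rcases pvScan_spec lines with ⟨hf, hr⟩ | ⟨m, k, hpick, hmem, hidx, hr, _⟩
  · rw [hf, hr]
    simp
  · have hne : lines.filter pvCand ≠ [] := by
      intro h; rw [h] at hmem; exact absurd hmem (List.not_mem_nil)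
    rw [if_neg hne, hr]
    have hk0 : ¬ ((Prod.swap (pvScoreA m, (k : Int))).1 < 0) := by simp
    rw [if_neg hk0]
    have hbest : (PySem.List.sorted (lines.filter pvCand) pvScoreA true).headD "" = m := by
      have h := pvHead?_sorted_rev (lines.filter pvCand)
      rw [hpick] at h
      cases hs : PySem.List.sorted (lines.filter pvCand) pvScoreA true with
      | nil => rw [hs] at h; simp at h
      | cons a t => rw [hs] at h; simp at h; simp [h]
    have hidx' : ((PySem.List.index? lines m).getD 0 : Nat) = k := by rw [hidx]; rfl
    obtain ⟨hklen, hget, -⟩ := PySem.List.getElem_of_index?_eq_some hidx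
    have hgetD : PySem.List.pyGetD lines (k : Int) "" = m := by
      rw [PySem.List.pyGetD_natCast, List.getD_eq_getElem _ _ hklen, hget]
    rw [hbest]
    simp only [hidx, Option.getD_some, Prod.swap]
    rw [← hgetD]
    exact pvTail_eq lines k

-- ===== VERDICT (by name: the statement is the Claim_ definition above) =====
theorem mrz_desde_texto_ocr_spec : Claim_equal_mrz_desde_texto_ocr := by
  intro ocr_text _
  unfold Spec_mrz_desde_texto_ocr mrz_desde_texto_ocr mrz_desde_texto_ocr_alt
  by_cases h : ocr_text = ""
  · subst h; decide
  · rw [if_neg h]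
    simp only [pvReplace_self, pvLines_eq]
    exact pvMain _
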